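-- pv_equiv track=rewrite | github.com/kevinramos2/Pruebas-de-Aleatoriedad | loteria/rachasEncimaDebajoMedia.py | rachasYFrecuencias
-- ===== SOURCE A (Python) =====
-- def rachasYFrecuencias(resultados, media):
--     corridasArriba = 0
--     corridasAbajo = 0
--     n1, n2 = 0, 0
--     tendenciaActual = None  # Para saber la tendencia actual de la corrida
--
--     for i in range(len(resultados)):
--         if resultados[i] > media:  # Por encima de la media
--             n1 += 1
--             if tendenciaActual != "arriba":
--                 corridasArriba += 1
--                 tendenciaActual = "arriba"
--         elif resultados[i] < media:  # Por debajo de la media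
--             n2 += 1
--             if tendenciaActual != "abajo":
--                 corridasAbajo += 1
--                 tendenciaActual = "abajo"
--
--     return corridasArriba, corridasAbajo, n1, n2
-- ===== SOURCE B (Python) =====
-- def rachasYFrecuencias(resultados, media):
--     labels = ['a' if x > media else 'b' for x in resultados if x != media]
--     n1 = sum(x > media for x in resultados)
--     n2 = sum(x < media for x in resultados)
--     corridasArriba = sum(1 for prev, cur in zip([None] + labels, labels)
--                          if cur == 'a' and prev != 'a')
--     corridasAbajo = sum(1 for prev, cur in zip([None] + labels, labels)
--                         if cur == 'b' and prev != 'b')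
--     return corridasArriba, corridasAbajo, n1, n2
-- ===== Notes on version B (the rewrite author's own statement) =====
-- stated objective: alternative
-- what changed: Replaces A's single stateful loop carrying a 'tendencia' flag with a declarative decomposition: filter out elements equal to the mean, map the rest to labels, and count runs as label positions whose predecessor differs (zip with the shifted list); n1/n2 become direct counts.
import Mathlib
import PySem

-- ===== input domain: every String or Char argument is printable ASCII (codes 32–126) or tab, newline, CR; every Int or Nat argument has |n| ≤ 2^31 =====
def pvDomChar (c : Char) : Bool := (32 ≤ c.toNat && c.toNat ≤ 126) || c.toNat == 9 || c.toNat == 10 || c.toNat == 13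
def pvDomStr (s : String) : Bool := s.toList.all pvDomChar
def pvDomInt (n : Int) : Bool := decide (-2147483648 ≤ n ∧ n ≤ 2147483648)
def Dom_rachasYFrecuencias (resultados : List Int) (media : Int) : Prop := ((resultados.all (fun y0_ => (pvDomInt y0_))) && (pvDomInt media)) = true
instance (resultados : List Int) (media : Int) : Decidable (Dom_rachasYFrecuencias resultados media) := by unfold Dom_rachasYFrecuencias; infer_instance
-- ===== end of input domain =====

-- B replaces A's stateful loop by filter/map labels plus a zip-with-predecessor run count (objective: alternative decomposition).

-- ===== PORT A =====
-- the for-loop of A, carrying (corridasArriba, corridasAbajo, n1, n2, tendenciaActual)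
def pvLoopA (media : Int) : List Int → Int × Int × Int × Int × Option String → Int × Int × Int × Int × Option String
  | [], st => st
  | x :: xs, (u, d, n1, n2, t) =>
    if x > media then
      if t ≠ some "arriba" then pvLoopA media xs (u + 1, d, n1 + 1, n2, some "arriba")
      else pvLoopA media xs (u, d, n1 + 1, n2, t)
    else if x < media then
      if t ≠ some "abajo" then pvLoopA media xs (u, d + 1, n1, n2 + 1, some "abajo")
      else pvLoopA media xs (u, d, n1, n2 + 1, t)
    else pvLoopA media xs (u, d, n1, n2, t)

def rachasYFrecuencias (resultados : List Int) (media : Int) : Int × Int × Int × Int :=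
  let st := pvLoopA media resultados (0, 0, 0, 0, none)
  (st.1, st.2.1, st.2.2.1, st.2.2.2.1)

-- ===== PORT B =====
-- labels = ['a' if x > media else 'b' for x in resultados if x != media]
def pvLabels (resultados : List Int) (media : Int) : List Char :=
  (resultados.filter (fun x => x ≠ media)).map (fun x => if x > media then 'a' else 'b')

-- sum(1 for prev, cur in zip([None] + labels, labels) if cur == c and prev != c)
def pvRuns (c : Char) (labels : List Char) : Int :=
  (((none :: labels.map some).zip labels).filter
    (fun p => p.2 == c && p.1 != some c)).length

def rachasYFrecuencias_alt (resultados : List Int) (media : Int) : Int × Int × Int × Int :=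
  let labels := pvLabels resultados media
  ((pvRuns 'a' labels), (pvRuns 'b' labels),
   ((resultados.filter (fun x => x > media)).length : Int),
   ((resultados.filter (fun x => x < media)).length : Int))

-- ===== PRECONDITION & SPEC =====
def Spec_rachasYFrecuencias (resultados : List Int) (media : Int) (out : Int × Int × Int × Int) : Prop := out = rachasYFrecuencias_alt resultados media
instance (resultados : List Int) (media : Int) (out : Int × Int × Int × Int) : Decidable (Spec_rachasYFrecuencias resultados media out) := by unfold Spec_rachasYFrecuencias; infer_instance

-- ===== CLAIM (what is proved, stated in full; the proofs are below) =====
def Claim_equal_rachasYFrecuencias : Prop := ∀ (resultados : List Int) (media : Int), Dom_rachasYFrecuencias resultados media → Spec_rachasYFrecuencias resultados media (rachasYFrecuencias resultados media)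

-- ===== LEMMAS AND PROOFS =====

-- run count of c in a label list, given the previous label (proof-side characterisation)
def pvCnt (c : Char) : List Char → Option Char → Int
  | [], _ => 0
  | y :: ys, p => (if y = c ∧ p ≠ some c then 1 else 0) + pvCnt c ys (some y)

-- B's zip/filter/length run count equals the recursive count starting from a given predecessor
theorem pvRuns_eq_cnt (c : Char) :
    ∀ (ls : List Char) (p : Option Char),
      ((((p :: ls.map some).zip ls).filter (fun q => q.2 == c && q.1 != some c)).length : Int)
        = pvCnt c ls p := by
  intro ls
  induction ls with
  | nil => intro p; simp [pvCnt]
  | cons y ys ih =>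
    intro p
    simp only [List.map_cons, List.zip_cons_cons, List.filter_cons, pvCnt, ← ih (some y)]
    by_cases hy : y = c
    · by_cases hp : p = some c
      · simp [hy, hp]
      · simp [hy, hp]
        omega
    · simp [hy]

-- encode A's tendencia string as B's label char
def pvEnc (t : Option String) : Option Char :=
  t.map (fun s => if s = "arriba" then 'a' else if s = "abajo" then 'b' else 'x')

theorem pvEnc_a (t : Option String) : (pvEnc t = some 'a') ↔ (t = some "arriba") := by
  cases t with
  | none => simp [pvEnc]
  | some s =>
    simp only [pvEnc, Option.map_some, Option.some.injEq]
    constructor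
    · intro h
      by_cases h1 : s = "arriba"
      · simp [h1]
      · by_cases h2 : s = "abajo" <;> simp [h1, h2] at h
    · intro h; simp [h]

theorem pvEnc_b (t : Option String) : (pvEnc t = some 'b') ↔ (t = some "abajo") := by
  cases t with
  | none => simp [pvEnc]
  | some s =>
    simp only [pvEnc, Option.map_some, Option.some.injEq]
    constructor
    · intro h
      by_cases h1 : s = "arriba"
      · simp [h1] at h
      · by_cases h2 : s = "abajo" <;> simp [h1, h2] at h
        exact h2
    · intro h; simp [h]

theorem pvEnc_arriba : pvEnc (some "arriba") = some 'a' := rfl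

theorem pvEnc_abajo : pvEnc (some "abajo") = some 'b' := by
  simp [pvEnc]

-- A's loop, from any state, adds the run counts and the above/below counts of the rest
theorem pvLoopA_eq (media : Int) :
    ∀ (l : List Int) (u d n1 n2 : Int) (t : Option String),
      pvLoopA media l (u, d, n1, n2, t) =
        (u + pvCnt 'a' (pvLabels l media) (pvEnc t),
         d + pvCnt 'b' (pvLabels l media) (pvEnc t),
         n1 + ((l.filter (fun x => x > media)).length : Int),
         n2 + ((l.filter (fun x => x < media)).length : Int),
         (pvLoopA media l (u, d, n1, n2, t)).2.2.2.2) := by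
  intro l
  induction l with
  | nil => intro u d n1 n2 t; simp [pvLoopA, pvLabels, pvCnt]
  | cons x xs ih =>
    intro u d n1 n2 t
    by_cases hgt : x > media
    · have hne : x ≠ media := by omega
      have hlt : ¬ x < media := by omega
      simp only [pvLoopA, if_pos hgt]
      by_cases ht : t ≠ some "arriba"
      · have hta : pvEnc t ≠ some 'a' := fun h => ht ((pvEnc_a t).1 h)
        rw [if_pos (by simpa using ht), ih]
        simp [pvLabels, pvCnt, hne, hgt, hlt, hta, pvEnc_arriba]
        omega
      · simp only [not_not] at ht
        rw [if_neg (by simp [ht]), ih]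
        simp [pvLabels, pvCnt, hne, hgt, hlt, ht, pvEnc_arriba]
        omega
    · by_cases hlt : x < media
      · have hne : x ≠ media := by omega
        simp only [pvLoopA, if_neg hgt, if_pos hlt]
        by_cases ht : t ≠ some "abajo"
        · have htb : pvEnc t ≠ some 'b' := fun h => ht ((pvEnc_b t).1 h)
          rw [if_pos (by simpa using ht), ih]
          simp [pvLabels, pvCnt, hne, hgt, hlt, htb, pvEnc_abajo]
          omega
        · simp only [not_not] at ht
          rw [if_neg (by simp [ht]), ih]
          simp [pvLabels, pvCnt, hne, hgt, hlt, ht, pvEnc_abajo]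
          omega
      · have heq : x = media := by omega
        simp only [pvLoopA, if_neg hgt, if_neg hlt]
        rw [ih]
        simp [pvLabels, heq]

-- ===== VERDICT (by name: the statement is the Claim_ definition above) =====
theorem rachasYFrecuencias_spec : Claim_equal_rachasYFrecuencias := by
  intro resultados media _
  show rachasYFrecuencias resultados media = rachasYFrecuencias_alt resultados media
  unfold rachasYFrecuencias rachasYFrecuencias_alt
  rw [pvLoopA_eq]
  simp [pvRuns, pvRuns_eq_cnt, pvEnc]
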